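-- pv_equiv track=rewrite | github.com/VincentWLi1997/BedtimeBytes | OPEN_AI_TEXT.py | filename_from_input
-- ===== SOURCE A (Python) =====
-- def filename_from_input(title):
--   alphanum = ""
--   for character in title:
--     if character.isalnum() or character == " ":
--       alphanum += character
--   alphanumSplit = alphanum.split()
--   if len(alphanumSplit) > 4:
--     alphanumSplit = alphanumSplit[:4]
--   return "_".join(alphanumSplit)
-- ===== SOURCE B (Python) =====
-- def filename_from_input(title):
--   words = []
--   cur = ""
--   for ch in title:
--     if ch.isalnum():
--       cur += ch
--     elif ch == " ":
--       if cur: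
--         words.append(cur)
--       cur = ""
--   if cur:
--     words.append(cur)
--   return "_".join(words[:4])
-- ===== Notes on version B (the rewrite author's own statement) =====
-- stated objective: alternative
-- what changed: Replaces A's filter-into-a-string-then-split pipeline by a single scan that builds the word list directly (append alnum chars to a current word, flush on space, skip everything else).
import Mathlib
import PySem

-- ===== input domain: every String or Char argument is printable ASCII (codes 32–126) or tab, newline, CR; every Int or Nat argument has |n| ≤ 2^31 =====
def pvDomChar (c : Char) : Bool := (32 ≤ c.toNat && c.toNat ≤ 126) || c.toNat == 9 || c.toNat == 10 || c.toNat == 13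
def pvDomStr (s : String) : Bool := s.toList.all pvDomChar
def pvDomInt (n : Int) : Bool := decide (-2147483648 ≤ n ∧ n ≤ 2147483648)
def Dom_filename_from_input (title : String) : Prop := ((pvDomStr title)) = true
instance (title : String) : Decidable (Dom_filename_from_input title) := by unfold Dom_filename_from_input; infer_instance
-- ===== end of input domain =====

-- B replaces A's filter-then-split pipeline by a single token-building scan (same return value; no speed claim proved here).

-- ===== PORT A =====
def filename_from_input (title : String) : String :=
  let alphanum : List Char :=
    title.toList.foldl (fun acc c => if PySem.Chars.isalnum c || c == ' ' then acc ++ [c] else acc) []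
  let alphanumSplit := PySem.Chars.split₀ alphanum
  let alphanumSplit :=
    if alphanumSplit.length > 4 then PySem.List.slice alphanumSplit none (some 4) else alphanumSplit
  String.mk (PySem.Chars.join "_".toList alphanumSplit)

-- ===== PORT B =====
-- single pass: (words, cur) state; append alnum chars, flush cur on ' ', skip other chars
def fbScan : List Char → List Char → List (List Char) → List (List Char)
  | [], cur, words => if cur = [] then words else words ++ [cur]
  | c :: rest, cur, words =>
    if PySem.Chars.isalnum c then fbScan rest (cur ++ [c]) words
    else if c = ' ' then fbScan rest [] (if cur = [] then words else words ++ [cur])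
    else fbScan rest cur words

def filename_from_input_alt (title : String) : String :=
  String.mk (PySem.Chars.join ['_'] ((fbScan title.toList [] []).take 4))

-- ===== PRECONDITION & SPEC =====
def Spec_filename_from_input (title : String) (out : String) : Prop := out = filename_from_input_alt title
instance (title : String) (out : String) : Decidable (Spec_filename_from_input title out) := by unfold Spec_filename_from_input; infer_instance

-- ===== CLAIM (what is proved, stated in full; the proofs are below) =====
def Claim_equal_filename_from_input : Prop := ∀ (title : String), Dom_filename_from_input title → Spec_filename_from_input title (filename_from_input title)

-- ===== LEMMAS AND PROOFS =====

theorem isspace_of_isalnum (c : Char) (h : PySem.Chars.isalnum c = true) :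
    PySem.Chars.isspace c = false := by
  simp only [PySem.Chars.isalnum, PySem.Chars.isalpha, PySem.Chars.isdigit, PySem.Chars.isupper,
    PySem.Chars.islower, PySem.Chars.isspace, Char.le_def, Char.toNat,
    UInt32.le_iff_toNat_le, Bool.or_eq_true, Bool.and_eq_true, decide_eq_true_eq,
    Bool.or_eq_false_iff, Bool.and_eq_false_iff, decide_eq_false_iff_not, not_le,
    show 'A'.val.toNat = 65 from rfl, show 'Z'.val.toNat = 90 from rfl,
    show 'a'.val.toNat = 97 from rfl, show 'z'.val.toNat = 122 from rfl,
    show '0'.val.toNat = 48 from rfl, show '9'.val.toNat = 57 from rfl] at *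
  omega

theorem split₀_go_filter (cs cur : List Char) (acc : List (List Char)) :
    PySem.Chars.split₀.go
      (cs.filter (fun c => PySem.Chars.isalnum c || c == ' ')) cur acc =
    fbScan cs cur.reverse acc.reverse := by
  induction cs generalizing cur acc with
  | nil =>
    simp only [List.filter_nil, PySem.Chars.split₀.go, fbScan, List.isEmpty_iff]
    by_cases h : cur = [] <;> simp [h]
  | cons c rest ih =>
    by_cases ha : PySem.Chars.isalnum c = true
    · have hs := isspace_of_isalnum c ha
      simp only [List.filter_cons, ha, Bool.true_or, if_pos, PySem.Chars.split₀.go, hs,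
        Bool.false_eq_true, if_false, fbScan, ih (c :: cur) acc, List.reverse_cons]
    · by_cases hc : c = ' '
      · subst hc
        have hs : PySem.Chars.isspace ' ' = true := by decide
        simp only [List.filter_cons, beq_self_eq_true, Bool.or_true, if_pos,
          PySem.Chars.split₀.go, hs, fbScan, ha, Bool.false_eq_true, if_false,
          List.isEmpty_iff]
        by_cases h : cur = []
        · simpa [h] using ih [] acc
        · have : cur.reverse ≠ [] := by simpa using h
          simpa [h, this] using ih [] (cur.reverse :: acc)
      · have hb : (c == ' ') = false := by simpa using hc
        simp only [List.filter_cons, ha, hb, Bool.or_self, Bool.false_eq_true, if_false,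
          ih cur acc, fbScan, hc]

theorem split₀_filter (cs : List Char) :
    PySem.Chars.split₀ (cs.filter (fun c => PySem.Chars.isalnum c || c == ' ')) =
    fbScan cs [] [] := by
  simpa using split₀_go_filter cs [] []

-- ===== VERDICT (by name: the statement is the Claim_ definition above) =====
theorem filename_from_input_spec : Claim_equal_filename_from_input := by
  intro title _
  unfold Spec_filename_from_input filename_from_input filename_from_input_alt
  have hfold := PySem.List.foldl_append_if (fun c => PySem.Chars.isalnum c || c == ' ')
    (fun c => c) title.toList []
  simp only [List.map_id_fun', id] at hfold
  rw [hfold]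
  simp only [List.nil_append, split₀_filter]
  set parts := fbScan title.toList [] [] with hp
  have hslice : PySem.List.slice parts none (some 4) = parts.take 4 := by
    simp [PySem.List.slice_to]
  by_cases h : parts.length > 4
  · simp only [h, if_true, hslice]
    rfl
  · simp only [h, if_false, List.take_of_length_le (by omega : parts.length ≤ 4)]
    rfl
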